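-- pv_equiv track=rewrite | github.com/EmiCuciu/CS-UBB-FMI-INFO | 1st Year/Fundamentele Programarii/Laboratoare/lab3/main.py | secv_max_relativ_prime
-- ===== SOURCE A (Python) =====
-- def cmmdc(a,b):
--     r=a%b
--     while r:
--         a=b
--         b=r
--         r=a%b
--     return b
--
-- def secv_max_relativ_prime(lista):
--     lungime_max=0
--     secventa_max=[]
--     for i in range(len(lista)-1):
--         nr1=lista[i]
--         nr2=lista[i+1]
--         if cmmdc(nr1,nr2)==1:
--             secventa_curenta=[nr1,nr2]
--             for j in range(i+2,len(lista)):
--                 nr3=lista[j]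
--                 if cmmdc(secventa_curenta[-1],nr3)==1:
--                     secventa_curenta.append(nr3)
--                 else:
--                     break
--             if len(secventa_curenta)>lungime_max:
--                 lungime_max=len(secventa_curenta)
--                 secventa_max=secventa_curenta
--     if secventa_max:
--         return secventa_max
-- ===== SOURCE B (Python) =====
-- def _gcd(a, b):
--     while b:
--         a, b = b, a % b
--     return a
--
-- def secv_max_relativ_prime(lista):
--     best = []
--     cur = []
--     for x in lista:
--         if cur and _gcd(cur[-1], x) == 1:
--             cur.append(x)
--         else:
--             if len(cur) > len(best):
--                 best = cur
--             cur = [x]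
--     if len(cur) > len(best):
--         best = cur
--     if len(best) >= 2:
--         return best
-- ===== Notes on version B (the rewrite author's own statement) =====
-- stated objective: faster
-- what changed: A restarts a fresh extension scan at every adjacent coprime pair (quadratic); B makes one pass keeping the current maximal run and the first strictly-longest run seen, so no rescans.
import Mathlib
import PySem

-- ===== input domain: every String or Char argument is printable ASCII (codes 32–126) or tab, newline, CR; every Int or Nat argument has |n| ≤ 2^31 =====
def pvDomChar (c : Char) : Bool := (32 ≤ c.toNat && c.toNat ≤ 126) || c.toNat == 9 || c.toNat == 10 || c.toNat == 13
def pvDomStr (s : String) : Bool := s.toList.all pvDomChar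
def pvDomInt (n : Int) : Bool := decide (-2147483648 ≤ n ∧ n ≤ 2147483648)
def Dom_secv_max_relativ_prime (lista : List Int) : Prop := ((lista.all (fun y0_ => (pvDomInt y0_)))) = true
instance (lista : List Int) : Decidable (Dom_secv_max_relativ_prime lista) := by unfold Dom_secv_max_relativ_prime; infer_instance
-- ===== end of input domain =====

-- B replaces A's quadratic restart-at-every-pair scan by a single pass over the maximal coprime runs (asymptotically faster); equivalence is about the return value.

-- ===== PORT A =====
-- A's while-loop Euclid, as structural recursion on fuel |b|+1 (enough: |a % b| < |b| each step);
-- Python raises ZeroDivisionError at b = 0 (excluded by Pre_): the b = 0 guard only makes the port total.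
def cmmdcAux : Nat -> Int -> Int -> Int
  | 0, a, _ => a
  | fuel+1, a, b =>
    if b = 0 then a
    else
      let r := PySem.Int.mod a b
      if r = 0 then b else cmmdcAux fuel b r

def cmmdc (a b : Int) : Int := cmmdcAux (b.natAbs + 1) a b

-- inner loop of A: extend secventa_curenta (with last element `last`) through the rest, break at a non-coprime pair
def extA : Int -> List Int -> List Int
  | _, [] => []
  | last, x :: xs => if cmmdc last x = 1 then x :: extA x xs else []

-- outer loop of A over every start index i (transcribed as recursion over the suffixes), state (lungime_max, secventa_max)
def loopA : List Int -> Nat -> List Int -> List Int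
  | x :: y :: rest, lmax, smax =>
    if cmmdc x y = 1 then
      let cand := x :: y :: extA y rest
      if lmax < cand.length then loopA (y :: rest) cand.length cand
      else loopA (y :: rest) lmax smax
    else loopA (y :: rest) lmax smax
  | _, _, smax => smax

def secv_max_relativ_prime (lista : List Int) : Option (List Int) :=
  let smax := loopA lista 0 []
  if smax = [] then none else some smax

-- ===== PORT B =====
-- def _gcd(a, b): while b: a, b = b, a % b; return a   (same fuel totalization)
def gcdBAux : Nat -> Int -> Int -> Int
  | 0, a, _ => a
  | fuel+1, a, b => if b = 0 then a else gcdBAux fuel b (PySem.Int.mod a b)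

def gcdB (a b : Int) : Int := gcdBAux (b.natAbs + 1) a b

-- one step of B's single pass; state = (best, cur); cur[-1] via getLast?
def stepB (st : List Int × List Int) (x : Int) : List Int × List Int :=
  match st.2.getLast? with
  | some last =>
      if gcdB last x = 1 then (st.1, st.2 ++ [x])
      else (if st.1.length < st.2.length then st.2 else st.1, [x])
  | none => (if st.1.length < st.2.length then st.2 else st.1, [x])

def secv_max_relativ_prime_alt (lista : List Int) : Option (List Int) :=
  let st := lista.foldl stepB ([], [])
  let best := if st.1.length < st.2.length then st.2 else st.1
  if 2 <= best.length then some best else none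

-- ===== PRECONDITION & SPEC =====
-- Pre_ excludes exactly the inputs where the Python A raises ZeroDivisionError: a 0 anywhere after the first element (cmmdc is then called with second argument 0).
def Pre_secv_max_relativ_prime (lista : List Int) : Prop := (0 : Int) ∉ lista.tail
instance (lista : List Int) : Decidable (Pre_secv_max_relativ_prime lista) := by unfold Pre_secv_max_relativ_prime; infer_instance
def pvWitness_secv_max_relativ_prime : List Int := [2, 3, 4]

def Spec_secv_max_relativ_prime (lista : List Int) (out : Option (List Int)) : Prop := out = secv_max_relativ_prime_alt lista
instance (lista : List Int) (out : Option (List Int)) : Decidable (Spec_secv_max_relativ_prime lista out) := by unfold Spec_secv_max_relativ_prime; infer_instance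

-- ===== CLAIM (what is proved, stated in full; the proofs are below) =====
def Claim_equal_secv_max_relativ_prime : Prop := ∀ (lista : List Int), Dom_secv_max_relativ_prime lista → Pre_secv_max_relativ_prime lista → Spec_secv_max_relativ_prime lista (secv_max_relativ_prime lista)

-- ===== LEMMAS AND PROOFS =====

-- B's helper gcd computes the same value as A's cmmdc (same fuel, same guard at b = 0)
lemma gcdBAux_zero (f : Nat) (a : Int) : gcdBAux f a 0 = a := by
  cases f <;> simp [gcdBAux]

lemma gcdBAux_eq_cmmdcAux (f : Nat) (a b : Int) : gcdBAux f a b = cmmdcAux f a b := by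
  induction f generalizing a b with
  | zero => rfl
  | succ f ih =>
    by_cases hb : b = 0
    · simp [gcdBAux, cmmdcAux, hb]
    · simp only [gcdBAux, cmmdcAux, hb, if_false]
      by_cases hr : PySem.Int.mod a b = 0
      · simp [hr, gcdBAux_zero]
      · simp [hr, ih]

lemma gcdB_eq_cmmdc (a b : Int) : gcdB a b = cmmdc a b := gcdBAux_eq_cmmdcAux _ a b

-- A's best-update on a candidate run t (only runs of length ≥ 2 are candidates)
def chooseA (p t : List Int) : List Int := if 2 ≤ t.length ∧ p.length < t.length then t else p

-- A's smax when the current run is cur (ending at e, followed by l): at a run start nothing is recorded yet, mid-run the whole run (with its lookahead) already is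
def pvSS (cur P : List Int) (e : Int) (l : List Int) : List Int :=
  if cur.length = 1 then P else chooseA P (cur ++ extA e l)

def finA (s : List Int) : Option (List Int) := if s = [] then none else some s
def finB (st : List Int × List Int) : Option (List Int) :=
  if 2 ≤ (if st.1.length < st.2.length then st.2 else st.1).length
  then some (if st.1.length < st.2.length then st.2 else st.1) else none

-- relation between A's recorded best P (1-runs never recorded) and B's best P' (may hold a 1-run)
def pvRel (P P' : List Int) : Prop :=
  (P = P' ∧ (P = [] ∨ 2 ≤ P.length)) ∨ (P = [] ∧ P'.length = 1)

-- a run of length 1 whose last element is e is [e]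
lemma pv_cur_singleton (cur : List Int) (e : Int) (h : cur.getLast? = some e)
    (h1 : cur.length = 1) : cur = [e] := by
  match cur, h1 with
  | [a], _ => simp at h; simp [h]

lemma pv_main : ∀ (l cur P P' : List Int) (e : Int),
    cur.getLast? = some e → pvRel P P' →
    finA (loopA (e :: l) (pvSS cur P e l).length (pvSS cur P e l)) = finB (l.foldl stepB (P', cur)) := by
  intro l
  induction l with
  | nil =>
    intro cur P P' e hlast hrel
    have hcur : cur ≠ [] := by intro h; simp [h] at hlast
    have hlen1 : 0 < cur.length := List.length_pos_of_ne_nil hcur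
    show finA (pvSS cur P e []) = finB (P', cur)
    simp only [pvSS, chooseA, finA, finB, extA, List.append_nil] at *
    rcases hrel with ⟨rfl, hP⟩ | ⟨rfl, hP'⟩
    · rcases hP with rfl | hP2 <;> split_ifs <;> simp_all <;> omega
    · split_ifs <;> simp_all <;> omega
  | cons x r ih =>
    intro cur P P' e hlast hrel
    have hcur : cur ≠ [] := by intro h; simp [h] at hlast
    have hlen1 : 0 < cur.length := List.length_pos_of_ne_nil hcur
    simp only [List.foldl_cons, stepB, hlast, gcdB_eq_cmmdc]
    by_cases hco : cmmdc e x = 1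
    · -- run continues through x
      simp only [hco, if_true]
      have hext : extA e (x :: r) = x :: extA x r := by simp [extA, hco]
      have hlast' : (cur ++ [x]).getLast? = some x := by simp
      by_cases h1 : cur.length = 1
      · -- cur = [e]: this is the run start, A records the full run now
        have hce : cur = [e] := pv_cur_singleton cur e hlast h1
        subst hce
        have hSS : pvSS [e] P e (x :: r) = P := by simp [pvSS]
        rw [hSS]
        have hSS' : pvSS ([e] ++ [x]) P x r = chooseA P (e :: x :: extA x r) := by
          simp [pvSS, chooseA]
        have hih := ih ([e] ++ [x]) P P' x hlast' hrel
        rw [hSS'] at hih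
        rw [loopA]
        simp only [hco, if_true]
        split_ifs with hgt
        · have hch : chooseA P (e :: x :: extA x r) = e :: x :: extA x r := by
            rw [chooseA, if_pos]
            exact ⟨by simp only [List.length_cons]; omega,
                   by simp only [List.length_cons] at hgt ⊢; omega⟩
          rw [hch] at hih
          exact hih
        · have hch : chooseA P (e :: x :: extA x r) = P := by
            rw [chooseA, if_neg]
            intro ⟨_, h⟩
            simp only [List.length_cons] at h hgt; omega
          rw [hch] at hih
          exact hih
      · -- mid-run: the candidate at x's pair is a strict suffix, A does not update
        have h2 : 2 ≤ cur.length := by omega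
        have hSS : pvSS cur P e (x :: r) = chooseA P (cur ++ x :: extA x r) := by
          simp [pvSS, h1, hext]
        have hassoc : cur ++ [x] ++ extA x r = cur ++ x :: extA x r := by simp
        have hSS' : pvSS (cur ++ [x]) P x r = chooseA P (cur ++ x :: extA x r) := by
          simp [pvSS, hassoc, hcur]
        have hllb : cur.length + 1 + (extA x r).length ≤ (chooseA P (cur ++ x :: extA x r)).length := by
          rw [chooseA]; split_ifs with h
          · simp only [List.length_append, List.length_cons]; omega
          · simp only [List.length_append, List.length_cons, not_and, not_lt] at h
            have := h (by omega)
            omega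
        have hih := ih (cur ++ [x]) P P' x hlast' hrel
        rw [hSS'] at hih
        rw [hSS, loopA]
        simp only [hco, if_true]
        split_ifs with hgt
        · exfalso
          simp only [List.length_cons] at hgt
          omega
        · exact hih
    · -- run breaks between e and x: A skips this start, B closes the run
      simp only [hco, if_false]
      have hSS : pvSS cur P e (x :: r) = pvSS cur P e [] := by
        simp [pvSS, extA, hco]
      have hrel' : pvRel (pvSS cur P e []) (if P'.length < cur.length then cur else P') := by
        simp only [pvSS, chooseA, extA, List.append_nil, pvRel]
        rcases hrel with ⟨rfl, hP⟩ | ⟨rfl, hP'⟩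
        · rcases hP with rfl | hP2 <;> split_ifs <;> simp_all <;> omega
        · split_ifs <;> simp_all <;> omega
      have hih := ih [x] (pvSS cur P e []) (if P'.length < cur.length then cur else P') x rfl hrel'
      have hSSx : pvSS [x] (pvSS cur P e []) x r = pvSS cur P e [] := by simp [pvSS]
      rw [hSSx] at hih
      rw [hSS, loopA]
      simp only [hco, if_false]
      exact hih

-- ===== VERDICT (by name: the statement is the Claim_ definition above) =====
theorem secv_max_relativ_prime_spec : Claim_equal_secv_max_relativ_prime := by
  intro lista _ _
  unfold Spec_secv_max_relativ_prime
  cases lista with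
  | nil => rfl
  | cons x rest =>
    have h := pv_main rest [x] [] [] x rfl (Or.inl ⟨rfl, Or.inl rfl⟩)
    have e2 : rest.foldl stepB ([], [x]) = (x :: rest).foldl stepB ([], []) := by
      simp [List.foldl_cons, stepB]
    rw [e2] at h
    exact h
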